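-- pv_equiv track=rewrite | github.com/mc-robinson/chop_chain_joiner | chop_make_alignment_test.py | get_full_seq
-- ===== SOURCE A (Python) =====
-- def get_full_seq(fasta_data):
-- 	full_seq = ''
-- 	for line in fasta_data:
-- 		if not(line[0] == '>'):
-- 			line = line.rstrip() #I could have just messed up some crap with this
-- 			full_seq = full_seq + line
-- 		if (line[0] == '>'): #if have new chain
-- 			full_seq = full_seq + '/' #to indicate chain break
-- 	full_seq = full_seq[1:] #get rid of beginning '/'
-- 	return full_seq + '*'
-- ===== SOURCE B (Python) =====
-- def get_full_seq(fasta_data):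
--     chains = [[]]
--     for line in fasta_data:
--         if line[0] == '>':
--             chains.append([])
--         else:
--             chains[-1].append(line.rstrip())
--     return '/'.join(''.join(chain) for chain in chains)[1:] + '*'
-- ===== Notes on version B (the rewrite author's own statement) =====
-- stated objective: alternative
-- what changed: Instead of interleaving '/' markers into one growing string, B maintains a list of per-chain fragment lists (a header starts a new empty chain, other lines append their rstrip to the last chain) and produces the result with one '/'.join of the ''.joined chains; the blind [1:] slice is kept.
import Mathlib
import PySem

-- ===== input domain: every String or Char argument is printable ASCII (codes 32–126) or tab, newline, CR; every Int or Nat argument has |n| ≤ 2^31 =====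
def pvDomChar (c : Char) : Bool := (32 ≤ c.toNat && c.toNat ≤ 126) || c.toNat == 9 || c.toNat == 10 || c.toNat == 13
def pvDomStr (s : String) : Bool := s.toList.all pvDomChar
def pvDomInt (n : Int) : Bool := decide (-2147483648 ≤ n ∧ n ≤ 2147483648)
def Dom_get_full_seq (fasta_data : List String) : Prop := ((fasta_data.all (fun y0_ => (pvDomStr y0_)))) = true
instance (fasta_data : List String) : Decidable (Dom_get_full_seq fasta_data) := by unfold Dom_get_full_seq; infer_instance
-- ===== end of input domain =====

-- B replaces A's single growing string with interleaved '/' markers by a list of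
-- per-chain fragment lists (a header starts a new empty chain, other lines append
-- to the last chain) joined once at the end; same result, different data structure.


-- ===== PORT A =====
-- line[0] is PySem.Str.pyGet? (none = IndexError, excluded by Pre_); the two sequential
-- `if`s of the loop body are kept, the first one rebinding `line` (the pair p).
def get_full_seq (fasta_data : List String) : String :=
  let full_seq := fasta_data.foldl (fun full_seq line =>
    let p := if ¬ (PySem.Str.pyGet? line 0 = some '>')
             then (PySem.Str.rstrip line, full_seq ++ PySem.Str.rstrip line)
             else (line, full_seq)
    if PySem.Str.pyGet? p.1 0 = some '>' then p.2 ++ "/" else p.2) ""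
  PySem.Str.slice full_seq (some 1) none ++ "*"

-- ===== PORT B =====
-- chains = [[]] : one fragment list per chain; headers append a new empty chain,
-- other lines append their rstrip to the last chain's fragments; the result is
-- '/'.join(''.join(chain) for chain in chains)[1:] + '*'.
def get_full_seq_alt (fasta_data : List String) : String :=
  let chains := fasta_data.foldl (fun chains line =>
    if PySem.Str.pyGet? line 0 = some '>' then chains ++ [[]]
    else chains.dropLast ++ [chains.getLastD [] ++ [PySem.Str.rstrip line]]) [([] : List String)]
  PySem.Str.slice (PySem.Str.join "/" (chains.map (fun chain => PySem.Str.join "" chain)))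
    (some 1) none ++ "*"

-- ===== PRECONDITION & SPEC =====
-- Pre_ excludes exactly the inputs where A raises IndexError on line[0]: a line that is
-- empty, or a non-header line that rstrips to empty (line[0] is rechecked after the rstrip).
def Pre_get_full_seq (fasta_data : List String) : Prop :=
  ∀ line ∈ fasta_data, PySem.Str.pyGet? line 0 = some '>' ∨ PySem.Str.rstrip line ≠ ""
instance (fasta_data : List String) : Decidable (Pre_get_full_seq fasta_data) := by
  unfold Pre_get_full_seq; infer_instance
def pvWitness_get_full_seq : List String := [">chainA", "ABC ", ">chainB", "DE"]
def Spec_get_full_seq (fasta_data : List String) (out : String) : Prop := out = get_full_seq_alt fasta_data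
instance (fasta_data : List String) (out : String) : Decidable (Spec_get_full_seq fasta_data out) := by unfold Spec_get_full_seq; infer_instance

-- ===== CLAIM (what is proved, stated in full; the proofs are below) =====
def Claim_equal_get_full_seq : Prop := ∀ (fasta_data : List String), Dom_get_full_seq fasta_data → Pre_get_full_seq fasta_data → Spec_get_full_seq fasta_data (get_full_seq fasta_data)

-- ===== LEMMAS AND PROOFS =====

-- the per-line piece both programs contribute to the final sequence
def pieceStr (line : String) : String :=
  if PySem.Str.pyGet? line 0 = some '>' then "/" else PySem.Str.rstrip line

-- rstrip is a prefix, so a nonempty rstrip keeps the first character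
theorem rstrip_head (cs : List Char) (h : PySem.Chars.rstrip cs ≠ []) :
    (PySem.Chars.rstrip cs)[0]? = cs[0]? := by
  have h1 : List.dropWhile PySem.Chars.isspace cs.reverse <:+ cs.reverse :=
    List.dropWhile_suffix _
  have hpre : PySem.Chars.rstrip cs <+: cs := by
    simpa [PySem.Chars.rstrip] using List.reverse_prefix.mpr h1
  obtain ⟨t, ht⟩ := hpre
  cases h' : PySem.Chars.rstrip cs with
  | nil => exact absurd h' h
  | cons a l =>
      rw [h'] at ht
      rw [← ht]
      simp

-- the fold that appends one piece per element builds the concatenation of the pieces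
theorem foldl_append_flatten (g : String → String) (l : List String) (init : String) :
    l.foldl (fun acc x => acc ++ g x) init
      = String.ofList (init.toList ++ (l.map (fun x => (g x).toList)).flatten) := by
  induction l generalizing init with
  | nil => simp
  | cons a l ih =>
      rw [List.foldl_cons, ih]
      simp [String.toList_append]

-- join over a list extended on the right adds one separator and the new part
theorem chars_join_append_cons (s : List Char) (xs : List (List Char)) (y : List Char)
    (h : xs ≠ []) :
    PySem.Chars.join s (xs ++ [y]) = PySem.Chars.join s xs ++ s ++ y := by
  induction xs with
  | nil => exact absurd rfl h
  | cons a m ih =>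
      cases m with
      | nil => simp [PySem.Chars.join_cons_cons, PySem.Chars.join_singleton]
      | cons b m' =>
          have hsplit : a :: b :: m' ++ [y] = a :: b :: (m' ++ [y]) := by simp
          have ih' := ih (by simp)
          rw [List.cons_append] at ih'
          rw [hsplit, PySem.Chars.join_cons_cons, ih', PySem.Chars.join_cons_cons]
          simp

-- one B-step adds exactly the line's piece to the joined chains
-- ''.join with empty separator is flattening
theorem join_nil_flatten (parts : List (List Char)) :
    PySem.Chars.join [] parts = parts.flatten := by
  induction parts with
  | nil => simp [PySem.Chars.join_nil]
  | cons a l ih =>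
      cases l with
      | nil => simp [PySem.Chars.join_singleton]
      | cons b m => rw [PySem.Chars.join_cons_cons]; simp [ih]

theorem step_join (chains : List (List String)) (h : chains ≠ []) (line : String) :
    (PySem.Str.join "/" ((if PySem.Str.pyGet? line 0 = some '>' then chains ++ [[]]
      else chains.dropLast ++ [chains.getLastD [] ++ [PySem.Str.rstrip line]]).map
        (fun chain => PySem.Str.join "" chain))).toList
    = (PySem.Str.join "/" (chains.map (fun chain => PySem.Str.join "" chain))).toList
      ++ (pieceStr line).toList := by
  rcases (chains.eq_nil_or_concat).resolve_left h with ⟨cs, a, rfl⟩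
  rw [List.concat_eq_append]
  by_cases hh : PySem.Str.pyGet? line 0 = some '>'
  · rw [if_pos hh, pieceStr, if_pos hh]
    simp only [PySem.Str.toList_join]
    rw [List.map_append (l₁ := cs ++ [a]) (l₂ := [[]]),
        List.map_append (l₁ := (cs ++ [a]).map _)]
    simp only [List.map_cons, List.map_nil]
    rw [chars_join_append_cons _ (((cs ++ [a]).map (fun chain => PySem.Str.join "" chain)).map
      String.toList) _ (by simp)]
    simp [PySem.Str.toList_join, PySem.Chars.join_nil]
  · rw [if_neg hh, pieceStr, if_neg hh]
    have h1 : (cs ++ [a]).dropLast = cs := by simp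
    have h2 : (cs ++ [a]).getLastD [] = a := by simp
    rw [h1, h2]
    simp only [List.map_append, List.map_cons, List.map_nil]
    simp only [PySem.Str.toList_join, List.map_append, List.map_cons, List.map_nil]
    cases cs with
    | nil => simp [PySem.Chars.join_singleton, join_nil_flatten]
    | cons c cs' =>
        rw [chars_join_append_cons _ (((c :: cs').map (fun chain => PySem.Str.join "" chain)).map
              String.toList) _ (by simp),
            chars_join_append_cons _ (((c :: cs').map (fun chain => PySem.Str.join "" chain)).map
              String.toList) _ (by simp)]
        simp [join_nil_flatten]

-- invariant of B's fold: the joined chains are the initial join plus all pieces so far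
theorem joinB_invariant (l : List String) :
    ∀ (chains : List (List String)), chains ≠ [] →
    (PySem.Str.join "/" ((l.foldl (fun chains line =>
        if PySem.Str.pyGet? line 0 = some '>' then chains ++ [[]]
        else chains.dropLast ++ [chains.getLastD [] ++ [PySem.Str.rstrip line]]) chains).map
          (fun chain => PySem.Str.join "" chain))).toList
      = (PySem.Str.join "/" (chains.map (fun chain => PySem.Str.join "" chain))).toList
        ++ (l.map (fun x => (pieceStr x).toList)).flatten := by
  induction l with
  | nil => intro chains _; simp
  | cons a l ih =>
      intro chains hch
      rw [List.foldl_cons]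
      have hne : (if PySem.Str.pyGet? a 0 = some '>' then chains ++ [[]]
          else chains.dropLast ++ [chains.getLastD [] ++ [PySem.Str.rstrip a]]) ≠ [] := by
        split <;> simp
      rw [ih _ hne, step_join chains hch a]
      simp

-- ===== VERDICT (by name: the statement is the Claim_ definition above) =====
theorem get_full_seq_spec : Claim_equal_get_full_seq := by
  intro fasta_data _hdom hpre
  simp only [Spec_get_full_seq, get_full_seq, get_full_seq_alt]
  -- A's fold is the concatenation of the pieces
  have hstep : fasta_data.foldl (fun full_seq line =>
      let p := if ¬ (PySem.Str.pyGet? line 0 = some '>')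
               then (PySem.Str.rstrip line, full_seq ++ PySem.Str.rstrip line)
               else (line, full_seq)
      if PySem.Str.pyGet? p.1 0 = some '>' then p.2 ++ "/" else p.2) ""
      = fasta_data.foldl (fun acc line => acc ++ pieceStr line) "" := by
    apply PySem.List.foldl_congr_mem
    intro acc line hmem
    have hpl := hpre line hmem
    simp only [pysem, pieceStr] at hpl ⊢
    by_cases hh : line.toList[0]? = some '>'
    · simp [hh]
    · have hr : PySem.Chars.rstrip line.toList ≠ [] := by
        intro hc
        rcases hpl with h | h
        · exact hh h
        · apply h
          rw [← String.ofList_toList (s := PySem.Str.rstrip line), PySem.Str.toList_rstrip, hc]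
      simp [hh, rstrip_head line.toList hr]
  rw [hstep, foldl_append_flatten pieceStr fasta_data ""]
  -- B's joined chains are the same concatenation
  have hB := joinB_invariant fasta_data [([] : List String)] (by simp)
  have hj0 : (PySem.Str.join "/" ([([] : List String)].map
      (fun chain => PySem.Str.join "" chain))).toList = [] := by
    simp [PySem.Str.toList_join, PySem.Chars.join_singleton, PySem.Chars.join_nil]
  rw [hj0, List.nil_append] at hB
  have hBs : PySem.Str.join "/" ((fasta_data.foldl (fun chains line =>
      if PySem.Str.pyGet? line 0 = some '>' then chains ++ [[]]
      else chains.dropLast ++ [chains.getLastD [] ++ [PySem.Str.rstrip line]]) [([] : List String)]).map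
        (fun chain => PySem.Str.join "" chain))
      = String.ofList ("".toList ++ (fasta_data.map (fun x => (pieceStr x).toList)).flatten) := by
    rw [← String.ofList_toList (s := PySem.Str.join "/" _), hB]
    simp
  rw [hBs]
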